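-- pv_equiv track=rewrite | github.com/BugHunters21pc/daa | floyd_warshell.py | negCyclefloydWarshall
-- ===== SOURCE A (Python) =====
-- V = 4
--
-- def negCyclefloydWarshall(graph):
--     dist=[[0 for i in range(V+1)]for j in range(V+1)]
--     for i in range(V):
--         for j in range(V):
--             dist[i][j] = graph[i][j]
--     for k in range(V):
--         for i in range(V):
--             for j in range(V):
--                 if (dist[i][k] + dist[k][j] < dist[i][j]):
--                         dist[i][j] = dist[i][k] + dist[k][j]
--
--     for i in range(V):
--         if (dist[i][i] < 0):
--             return True
--
--     return False
-- ===== SOURCE B (Python) =====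
-- V = 4
--
-- def negCyclefloydWarshall(graph):
--     # local snapshot of the 4x4 weights (reads every entry, as the task needs them all)
--     w = [[graph[i][j] for j in range(V)] for i in range(V)]
--     # A negative cycle exists in the 4-vertex digraph iff some simple cycle
--     # (1 to 4 distinct vertices) has negative total weight: check them all.
--     for a in range(V):
--         if w[a][a] < 0:
--             return True
--     for a in range(V):
--         for b in range(V):
--             if a != b and w[a][b] + w[b][a] < 0:
--                 return True
--     for a in range(V):
--         for b in range(V):
--             for c in range(V):
--                 if a != b and b != c and a != c and \
--                         w[a][b] + w[b][c] + w[c][a] < 0: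
--                     return True
--     for a in range(V):
--         for b in range(V):
--             for c in range(V):
--                 for d in range(V):
--                     if a != b and a != c and a != d and b != c and b != d and c != d and \
--                             w[a][b] + w[b][c] + w[c][d] + w[d][a] < 0:
--                         return True
--     return False
-- ===== Notes on version B (the rewrite author's own statement) =====
-- stated objective: alternative
-- what changed: Replaces the in-place Floyd-Warshall triple loop plus diagonal scan with a direct enumeration of all simple cycles (1 to 4 distinct vertices) of the fixed 4-vertex graph, returning True iff one has negative total weight.
import Mathlib
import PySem

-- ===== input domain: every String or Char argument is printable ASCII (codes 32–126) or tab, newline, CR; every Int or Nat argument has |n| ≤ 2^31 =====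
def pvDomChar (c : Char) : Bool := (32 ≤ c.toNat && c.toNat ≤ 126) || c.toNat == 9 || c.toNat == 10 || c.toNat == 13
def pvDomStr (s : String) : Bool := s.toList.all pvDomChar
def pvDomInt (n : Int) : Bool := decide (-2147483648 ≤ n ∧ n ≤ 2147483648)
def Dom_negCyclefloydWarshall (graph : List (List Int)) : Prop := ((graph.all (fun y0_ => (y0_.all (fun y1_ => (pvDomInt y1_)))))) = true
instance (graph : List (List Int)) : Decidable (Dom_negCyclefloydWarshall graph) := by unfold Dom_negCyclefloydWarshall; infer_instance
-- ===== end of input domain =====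

-- B replaces the in-place Floyd-Warshall triple loop with a direct enumeration of all
-- simple cycles (1-4 distinct vertices) of the fixed 4-vertex graph (objective: alternative).
-- Equivalence is about the RETURN value; neither program mutates its argument.

-- ===== PORT A =====
-- graph[i][j]; exact under Pre_ (outside Pre_ Python raises IndexError, excluded there)
def wtA (g : List (List Int)) (i j : Nat) : Int := (g.getD i []).getD j 0

-- dist[i][j] read / in-place write on the 5x5 list-of-lists matrix
def mget (m : List (List Int)) (i j : Nat) : Int := (m.getD i []).getD j 0
def mset (m : List (List Int)) (i j : Nat) (v : Int) : List (List Int) :=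
  m.set i ((m.getD i []).set j v)

-- dist = [[0]*5 for _ in range(5)] then the copy loop dist[i][j] = graph[i][j]
def fwCopy (g : List (List Int)) : List (List Int) :=
  (List.range 4).foldl (fun m i => (List.range 4).foldl
    (fun m j => mset m i j (wtA g i j)) m)
    (List.replicate 5 (List.replicate 5 (0 : Int)))

-- the triple loop with its conditional in-place relaxation
def fwTriple (g : List (List Int)) : List (List Int) :=
  (List.range 4).foldl (fun m k => (List.range 4).foldl
    (fun m i => (List.range 4).foldl
      (fun m j => if mget m i k + mget m k j < mget m i j
                  then mset m i j (mget m i k + mget m k j) else m) m) m)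
    (fwCopy g)

-- the final scan: return True on the first dist[i][i] < 0, else False
def negCyclefloydWarshall (graph : List (List Int)) : Bool :=
  (List.range 4).any (fun i => decide (mget (fwTriple graph) i i < 0))

-- ===== PORT B =====
def wtB (g : List (List Int)) (i j : Nat) : Int := (g.getD i []).getD j 0

-- check every simple cycle on 1, 2, 3 and 4 distinct vertices (early return = any)
def enumB (w : Nat → Nat → Int) : Bool :=
  ((List.range 4).any fun a => decide (w a a < 0)) ||
  (((List.range 4).any fun a => (List.range 4).any fun b =>
      decide (a ≠ b) && decide (w a b + w b a < 0)) ||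
  (((List.range 4).any fun a => (List.range 4).any fun b => (List.range 4).any fun c =>
      decide (a ≠ b) && decide (b ≠ c) && decide (a ≠ c) &&
      decide (w a b + w b c + w c a < 0)) ||
   ((List.range 4).any fun a => (List.range 4).any fun b => (List.range 4).any fun c =>
      (List.range 4).any fun d =>
      decide (a ≠ b) && decide (a ≠ c) && decide (a ≠ d) &&
      decide (b ≠ c) && decide (b ≠ d) && decide (c ≠ d) &&
      decide (w a b + w b c + w c d + w d a < 0))))

-- w = [[graph[i][j] for j in range(V)] for i in range(V)]: the local snapshot
def wmatB (g : List (List Int)) : List (List Int) :=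
  (List.range 4).map (fun i => (List.range 4).map (fun j => wtB g i j))

-- w[a][b]
def wgetB (m : List (List Int)) (a b : Nat) : Int := (m.getD a []).getD b 0

def negCyclefloydWarshall_alt (graph : List (List Int)) : Bool :=
  enumB (wgetB (wmatB graph))

-- ===== PRECONDITION & SPEC =====
-- Pre_ = exactly the inputs where A returns: fewer than 4 rows, or a too-short row
-- among the first 4, makes Python's graph[i][j] raise IndexError.
def Pre_negCyclefloydWarshall (graph : List (List Int)) : Prop :=
  4 ≤ graph.length ∧ ∀ r ∈ graph.take 4, 4 ≤ r.length
instance (graph : List (List Int)) : Decidable (Pre_negCyclefloydWarshall graph) := by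
  unfold Pre_negCyclefloydWarshall; infer_instance

def pvWitness_negCyclefloydWarshall : List (List Int) :=
  [[0, 1, 2, 3], [1, 0, 1, 2], [2, 1, 0, 1], [3, 2, 1, 0]]

def Spec_negCyclefloydWarshall (graph : List (List Int)) (out : Bool) : Prop := out = negCyclefloydWarshall_alt graph
instance (graph : List (List Int)) (out : Bool) : Decidable (Spec_negCyclefloydWarshall graph out) := by unfold Spec_negCyclefloydWarshall; infer_instance

-- ===== CLAIM (what is proved, stated in full; the proofs are below) =====
def Claim_equal_negCyclefloydWarshall : Prop := ∀ (graph : List (List Int)), Dom_negCyclefloydWarshall graph → Pre_negCyclefloydWarshall graph → Spec_negCyclefloydWarshall graph (negCyclefloydWarshall graph)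

-- ===== LEMMAS AND PROOFS =====

-- functional model of A's dist matrix: a function (i, j) ↦ dist[i][j]
def fwInit (w : Nat → Nat → Int) : Nat → Nat → Int :=
  (List.range 4).foldl (fun d i => (List.range 4).foldl
    (fun d j => fun i' j' => if i' = i ∧ j' = j then w i j else d i' j') d) (fun _ _ => 0)

def fwUpd (k i j : Nat) (d : Nat → Nat → Int) : Nat → Nat → Int :=
  if d i k + d k j < d i j then
    (fun i' j' => if i' = i ∧ j' = j then d i k + d k j else d i' j')
  else d

def fwFinal (w : Nat → Nat → Int) : Nat → Nat → Int :=
  (List.range 4).foldl (fun d k => (List.range 4).foldl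
    (fun d i => (List.range 4).foldl (fun d j => fwUpd k i j d) d) d) (fwInit w)

def fwAny (w : Nat → Nat → Int) : Bool :=
  (List.range 4).any (fun i => decide (fwFinal w i i < 0))

-- simulation: the list matrix implements the functional model
def Sh (m : List (List Int)) : Prop :=
  m.length = 5 ∧ ∀ i, i < 5 → (m.getD i []).length = 5

theorem getD_set_self {α : Type} (l : List α) (i : Nat) (a d : α) (h : i < l.length) :
    (l.set i a).getD i d = a := by
  simp [List.getD_eq_getElem?_getD, h]

theorem getD_set_ne {α : Type} (l : List α) (i j : Nat) (a d : α) (h : ¬ i = j) :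
    (l.set i a).getD j d = l.getD j d := by
  simp [List.getD_eq_getElem?_getD, h]

theorem mget_mset (m : List (List Int)) (i j i' j' : Nat) (v : Int)
    (hi : i < m.length) (hj : j < (m.getD i []).length) :
    mget (mset m i j v) i' j' = if i' = i ∧ j' = j then v else mget m i' j' := by
  unfold mget mset
  by_cases hii : i' = i
  · subst hii
    rw [getD_set_self _ _ _ _ hi]
    by_cases hjj : j' = j
    · subst hjj
      rw [getD_set_self _ _ _ _ hj]
      simp
    · rw [getD_set_ne _ _ _ _ _ (fun h => hjj h.symm)]
      simp [hjj]
  · rw [getD_set_ne _ _ _ _ _ (fun h => hii h.symm)]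
    simp [hii]

theorem Sh_mset (m : List (List Int)) (i j : Nat) (v : Int) (h : Sh m) :
    Sh (mset m i j v) := by
  obtain ⟨h1, h2⟩ := h
  refine ⟨by simp [mset, h1], ?_⟩
  intro i' hi'
  by_cases hii : i = i'
  · subst hii
    rw [mset, getD_set_self _ _ _ _ (by omega), List.length_set]
    exact h2 i hi' 
  · rw [mset, getD_set_ne _ _ _ _ _ hii]
    exact h2 i' hi'

def MR (m : List (List Int)) (d : Nat → Nat → Int) : Prop :=
  Sh m ∧ ∀ i j, mget m i j = d i j

theorem foldl_sim {α β γ : Type} (R : α → β → Prop) (f : α → γ → α) (g : β → γ → β) :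
    ∀ (l : List γ) (a : α) (b : β),
    (∀ c ∈ l, ∀ a b, R a b → R (f a c) (g b c)) → R a b →
    R (l.foldl f a) (l.foldl g b) := by
  intro l
  induction l with
  | nil => intro a b _ h; exact h
  | cons c t ih =>
      intro a b hstep h
      exact ih _ _ (fun c' hc' => hstep c' (List.mem_cons_of_mem _ hc'))
        (hstep c List.mem_cons_self _ _ h)

theorem rep_row (i : Nat) (hi : i < 5) :
    (List.replicate 5 (List.replicate 5 (0 : Int))).getD i []
      = List.replicate 5 (0 : Int) := by
  rw [List.getD_eq_getElem?_getD, List.getElem?_replicate, if_pos hi, Option.getD_some]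

theorem mget_rep (i j : Nat) :
    mget (List.replicate 5 (List.replicate 5 (0 : Int))) i j = 0 := by
  unfold mget
  by_cases hi : i < 5
  · rw [rep_row i hi, List.getD_eq_getElem?_getD, List.getElem?_replicate]
    split_ifs <;> rfl
  · have hrow : (List.replicate 5 (List.replicate 5 (0 : Int))).getD i [] = [] := by
      rw [List.getD_eq_getElem?_getD, List.getElem?_replicate, if_neg hi]
      rfl
    rw [hrow]
    rfl

theorem Sh_rep : Sh (List.replicate 5 (List.replicate 5 (0 : Int))) := by
  refine ⟨by simp, ?_⟩
  intro i hi
  rw [rep_row i hi]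
  simp

theorem copy_sim (g : List (List Int)) : MR (fwCopy g) (fwInit (wtA g)) := by
  unfold fwCopy fwInit
  refine foldl_sim MR _ _ _ _ _ ?_ ⟨Sh_rep, mget_rep⟩
  intro i hi m d hR
  have hi4 : i < 4 := List.mem_range.mp hi
  refine foldl_sim MR _ _ _ _ _ ?_ hR
  intro j hj m d hR
  have hj4 : j < 4 := List.mem_range.mp hj
  obtain ⟨hsh, hmg⟩ := hR
  refine ⟨Sh_mset m i j _ hsh, ?_⟩
  intro i' j'
  rw [mget_mset m i j i' j' _ (by have := hsh.1; omega)
        (by have := hsh.2 i (by omega); omega)]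
  by_cases hP : i' = i ∧ j' = j <;> simp [hP, hmg]

theorem triple_sim (g : List (List Int)) : MR (fwTriple g) (fwFinal (wtA g)) := by
  unfold fwTriple fwFinal
  refine foldl_sim MR _ _ _ _ _ ?_ (copy_sim g)
  intro k hk m d hR
  have hk4 : k < 4 := List.mem_range.mp hk
  refine foldl_sim MR _ _ _ _ _ ?_ hR
  intro i hi m d hR
  have hi4 : i < 4 := List.mem_range.mp hi
  refine foldl_sim MR _ _ _ _ _ ?_ hR
  intro j hj m d hR
  have hj4 : j < 4 := List.mem_range.mp hj
  obtain ⟨hsh, hmg⟩ := hR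
  by_cases hc : d i k + d k j < d i j
  · rw [if_pos (by rw [hmg, hmg, hmg]; exact hc)]
    refine ⟨Sh_mset m i j _ hsh, ?_⟩
    intro i' j'
    rw [mget_mset m i j i' j' _ (by have := hsh.1; omega)
          (by have := hsh.2 i (by omega); omega)]
    by_cases hP : i' = i ∧ j' = j <;> simp [fwUpd, hc, hP, hmg]
  · rw [if_neg (by rw [hmg, hmg, hmg]; exact hc)]
    refine ⟨hsh, ?_⟩
    intro i' j'
    simp [fwUpd, hc, hmg]

theorem port_eq_model (g : List (List Int)) :
    negCyclefloydWarshall g = fwAny (wtA g) := by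
  have h := (triple_sim g).2
  have hfun : (fun i => decide (mget (fwTriple g) i i < 0))
      = (fun i => decide (fwFinal (wtA g) i i < 0)) :=
    funext fun i => by rw [h i i]
  unfold negCyclefloydWarshall fwAny
  rw [hfun]

-- weight of the walk along a vertex list
def pw (w : Nat → Nat → Int) : List Nat → Int
  | a :: b :: t => w a b + pw w (b :: t)
  | _ => 0

-- split a walk at an occurrence of vertex v (lists in cons-normal form)
theorem pw_split (w : Nat → Nat → Int) :
    ∀ (xs : List Nat) (a v : Nat) (ys : List Nat),
    pw w (a :: (xs ++ v :: ys)) = pw w (a :: (xs ++ [v])) + pw w (v :: ys) := by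
  intro xs
  induction xs with
  | nil => intro a v ys; simp [pw]
  | cons b t ih =>
      intro a v ys
      simp only [List.cons_append, pw]
      rw [ih b v ys]; ring

-- pointwise order on dist matrices
def dle (d d' : Nat → Nat → Int) : Prop := ∀ i j, d i j ≤ d' i j

theorem fwUpd_dle (k i j : Nat) (d : Nat → Nat → Int) : dle (fwUpd k i j d) d := by
  intro i' j'
  unfold fwUpd
  split_ifs with h
  · by_cases he : i' = i ∧ j' = j
    · obtain ⟨rfl, rfl⟩ := he; simp; omega
    · simp [he]
  · exact le_refl _

theorem foldl_upd_dle (k : Nat) :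
    ∀ (ps : List (Nat × Nat)) (d : Nat → Nat → Int),
    dle (ps.foldl (fun d p => fwUpd k p.1 p.2 d) d) d := by
  intro ps
  induction ps with
  | nil => intro d i j; exact le_refl _
  | cons p t ih =>
      intro d i j
      simp only [List.foldl_cons]
      exact le_trans (ih (fwUpd k p.1 p.2 d) i j) (fwUpd_dle k p.1 p.2 d i j)

theorem fwUpd_self_le (k i j : Nat) (d : Nat → Nat → Int) :
    fwUpd k i j d i j ≤ d i k + d k j := by
  unfold fwUpd
  split_ifs with h
  · simp
  · omega

theorem foldl_upd_mem_le (k i j : Nat) :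
    ∀ (ps : List (Nat × Nat)) (d : Nat → Nat → Int), (i, j) ∈ ps →
    (ps.foldl (fun d p => fwUpd k p.1 p.2 d) d) i j ≤ d i k + d k j := by
  intro ps
  induction ps with
  | nil => intro d h; simp at h
  | cons p t ih =>
      intro d hm
      simp only [List.foldl_cons]
      by_cases ht : (i, j) ∈ t
      · refine le_trans (ih _ ht) ?_
        have h1 := fwUpd_dle k p.1 p.2 d
        exact add_le_add (h1 i k) (h1 k j)
      · have hp : p = (i, j) := by
          rcases List.mem_cons.mp hm with h | h
          · exact h.symm
          · exact absurd h ht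
        subst hp
        exact le_trans (foldl_upd_dle k t _ i j) (fwUpd_self_le k i j d)

def pairs4 : List (Nat × Nat) :=
  [(0,0),(0,1),(0,2),(0,3),(1,0),(1,1),(1,2),(1,3),
   (2,0),(2,1),(2,2),(2,3),(3,0),(3,1),(3,2),(3,3)]

theorem mem_pairs4 (i j : Nat) (hi : i < 4) (hj : j < 4) : (i, j) ∈ pairs4 := by
  interval_cases i <;> interval_cases j <;> decide

-- one round of A's triple loop, as a fold over the row-major pair list
def rnd (k : Nat) (d : Nat → Nat → Int) : Nat → Nat → Int :=
  pairs4.foldl (fun d p => fwUpd k p.1 p.2 d) d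

def dAfter (w : Nat → Nat → Int) : Nat → (Nat → Nat → Int)
  | 0 => fwInit w
  | k + 1 => rnd k (dAfter w k)

theorem range4_eq : List.range 4 = [0, 1, 2, 3] := by decide

theorem fwFinal_eq (w : Nat → Nat → Int) : fwFinal w = dAfter w 4 := by
  simp only [fwFinal, dAfter, rnd, pairs4, range4_eq, List.foldl_cons, List.foldl_nil]

theorem rnd_le (k i j : Nat) (d : Nat → Nat → Int) (hi : i < 4) (hj : j < 4) :
    rnd k d i j ≤ d i k + d k j :=
  foldl_upd_mem_le k i j pairs4 d (mem_pairs4 i j hi hj)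

theorem rnd_dle (k : Nat) (d : Nat → Nat → Int) : dle (rnd k d) d :=
  foldl_upd_dle k pairs4 d

theorem fwInit_eq (w : Nat → Nat → Int) (a b : Nat) (ha : a < 4) (hb : b < 4) :
    fwInit w a b = w a b := by
  interval_cases a <;> interval_cases b <;>
    simp [fwInit, range4_eq, List.foldl_cons, List.foldl_nil]

-- completeness: after round k, dist[a][b] is at most the weight of any path a→b
-- whose (distinct) intermediate vertices are all < k
theorem fw_complete : ∀ (k : Nat), k ≤ 4 → ∀ (w : Nat → Nat → Int) (a b : Nat) (mids : List Nat),
    a < 4 → b < 4 → (∀ x ∈ mids, x < k) → mids.Nodup →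
    dAfter w k a b ≤ pw w ((a :: mids) ++ [b]) := by
  intro k
  induction k with
  | zero =>
      intro _ w a b mids ha hb hlt _
      have hmids : mids = [] := by
        cases mids with
        | nil => rfl
        | cons x t => exact absurd (hlt x List.mem_cons_self) (by omega)
      subst hmids
      have := fwInit_eq w a b ha hb
      simp [dAfter, pw, this]
  | succ k ih =>
      intro hk4 w a b mids ha hb hlt hnd
      have hk : k < 4 := by omega
      by_cases hkm : k ∈ mids
      · obtain ⟨m1, m2, rfl⟩ := List.append_of_mem hkm
        have hnd1 : m1.Nodup := hnd.of_append_left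
        have hndk : (k :: m2).Nodup := hnd.of_append_right
        have hk2 : k ∉ m2 := (List.nodup_cons.mp hndk).1
        have hnd2 : m2.Nodup := (List.nodup_cons.mp hndk).2
        have hdisj := List.disjoint_of_nodup_append hnd
        have hm1 : ∀ x ∈ m1, x < k := by
          intro x hx
          have hx1 : x < k + 1 := hlt x (by simp [hx])
          have hxk : x ≠ k := fun h => hdisj hx (h ▸ List.mem_cons_self)
          omega
        have hm2 : ∀ x ∈ m2, x < k := by
          intro x hx
          have hx1 : x < k + 1 := hlt x (by simp [hx])
          have hxk : x ≠ k := fun h => hk2 (h ▸ hx)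
          omega
        have h1 := ih (by omega) w a k m1 ha hk hm1 hnd1
        have h2 := ih (by omega) w k b m2 hk hb hm2 hnd2
        have h3 := rnd_le k a b (dAfter w k) ha hb
        simp only [List.cons_append, List.append_assoc] at h1 h2 ⊢
        rw [pw_split w m1 a k (m2 ++ [b])]
        calc dAfter w (k + 1) a b = rnd k (dAfter w k) a b := rfl
          _ ≤ dAfter w k a k + dAfter w k k b := h3
          _ ≤ pw w (a :: (m1 ++ [k])) + pw w (k :: (m2 ++ [b])) := add_le_add h1 h2
      · have hm : ∀ x ∈ mids, x < k := by
          intro x hx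
          have hx1 : x < k + 1 := hlt x hx
          have hxk : x ≠ k := fun h => hkm (h ▸ hx)
          omega
        exact le_trans (rnd_dle k (dAfter w k) a b) (ih (by omega) w a b mids ha hb hm hnd)

-- soundness: every dist entry is the weight of some actual walk
def SInv (w : Nat → Nat → Int) (d : Nat → Nat → Int) : Prop :=
  ∀ i j, i < 4 → j < 4 →
    ∃ mids : List Nat, (∀ x ∈ mids, x < 4) ∧ pw w ((i :: mids) ++ [j]) = d i j

theorem sinv_init (w : Nat → Nat → Int) : SInv w (fwInit w) := by
  intro i j hi hj
  exact ⟨[], by simp, by rw [fwInit_eq w i j hi hj]; simp [pw]⟩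

theorem sinv_upd (w : Nat → Nat → Int) (k i j : Nat) (hk : k < 4)
    (d : Nat → Nat → Int) (h : SInv w d) : SInv w (fwUpd k i j d) := by
  intro i' j' hi' hj'
  by_cases hc : d i k + d k j < d i j
  · by_cases he : i' = i ∧ j' = j
    · obtain ⟨rfl, rfl⟩ := he
      obtain ⟨m1, hm1, e1⟩ := h i' k hi' hk
      obtain ⟨m2, hm2, e2⟩ := h k j' hk hj'
      have hval : fwUpd k i' j' d i' j' = d i' k + d k j' := by simp [fwUpd, hc]
      refine ⟨m1 ++ k :: m2, ?_, ?_⟩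
      · intro x hx
        rcases List.mem_append.mp hx with hx | hx
        · exact hm1 x hx
        · rcases List.mem_cons.mp hx with rfl | hx
          · exact hk
          · exact hm2 x hx
      · rw [hval]
        simp only [List.cons_append, List.append_assoc] at e1 e2 ⊢
        rw [pw_split w m1 i' k (m2 ++ [j']), e1, e2]
    · have hval : fwUpd k i j d i' j' = d i' j' := by
        simp only [fwUpd, if_pos hc]
        exact if_neg he
      rw [hval]
      exact h i' j' hi' hj'
  · have hval : fwUpd k i j d = d := by simp [fwUpd, hc]
    rw [hval]
    exact h i' j' hi' hj'

theorem sinv_foldl (w : Nat → Nat → Int) (k : Nat) (hk : k < 4) :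
    ∀ (ps : List (Nat × Nat)),
    ∀ d, SInv w d → SInv w (ps.foldl (fun d p => fwUpd k p.1 p.2 d) d) := by
  intro ps
  induction ps with
  | nil => intro d h; exact h
  | cons p t ih =>
      intro d h
      simp only [List.foldl_cons]
      exact ih _ (sinv_upd w k p.1 p.2 hk d h)

theorem sinv_dAfter (w : Nat → Nat → Int) : ∀ k, k ≤ 4 → SInv w (dAfter w k) := by
  intro k
  induction k with
  | zero => intro _; exact sinv_init w
  | succ k ih =>
      intro hk
      simp only [dAfter, rnd]
      exact sinv_foldl w k (by omega) pairs4 _ (ih (by omega))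

-- extracting a duplicated element
theorem not_nodup_decomp : ∀ (l : List Nat), ¬ l.Nodup →
    ∃ xs v ys zs, l = xs ++ (v :: ys) ++ v :: zs := by
  intro l
  induction l with
  | nil => intro h; exact absurd List.nodup_nil h
  | cons a t ih =>
      intro h
      by_cases ha : a ∈ t
      · obtain ⟨s, t', rfl⟩ := List.append_of_mem ha
        exact ⟨[], a, s, t', by simp⟩
      · have hnt : ¬ t.Nodup := by
          intro hnd; exact h (List.nodup_cons.mpr ⟨ha, hnd⟩)
        obtain ⟨xs, v, ys, zs, rfl⟩ := ih hnt
        exact ⟨a :: xs, v, ys, zs, rfl⟩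

theorem nodup_lt4_len (l : List Nat) (hnd : l.Nodup) (hb : ∀ x ∈ l, x < 4) :
    l.length ≤ 4 := by
  have hsub : l ⊆ List.range 4 := fun x hx => List.mem_range.mpr (hb x hx)
  have := (hnd.subperm hsub).length_le
  simpa using this

-- hitting the enumeration clauses
theorem enum1 (w : Nat → Nat → Int) (i : Nat) (hi : i < 4) (h : w i i < 0) :
    enumB w = true := by
  unfold enumB
  simp only [Bool.or_eq_true]
  exact Or.inl <| List.any_eq_true.mpr ⟨i, List.mem_range.mpr hi, by simpa⟩

theorem enum2 (w : Nat → Nat → Int) (i j : Nat) (hi : i < 4) (hj : j < 4)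
    (hne : i ≠ j) (h : w i j + w j i < 0) : enumB w = true := by
  unfold enumB
  simp only [Bool.or_eq_true]
  exact Or.inr <| Or.inl <| List.any_eq_true.mpr ⟨i, List.mem_range.mpr hi,
    List.any_eq_true.mpr ⟨j, List.mem_range.mpr hj, by simp [hne, h]⟩⟩

theorem enum3 (w : Nat → Nat → Int) (i j k : Nat) (hi : i < 4) (hj : j < 4) (hk : k < 4)
    (h1 : i ≠ j) (h2 : j ≠ k) (h3 : i ≠ k) (h : w i j + w j k + w k i < 0) :
    enumB w = true := by
  unfold enumB
  simp only [Bool.or_eq_true]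
  exact Or.inr <| Or.inr <| Or.inl <| List.any_eq_true.mpr ⟨i, List.mem_range.mpr hi,
    List.any_eq_true.mpr ⟨j, List.mem_range.mpr hj,
      List.any_eq_true.mpr ⟨k, List.mem_range.mpr hk, by simp [h1, h2, h3, h]⟩⟩⟩

theorem enum4 (w : Nat → Nat → Int) (i j k l : Nat) (hi : i < 4) (hj : j < 4)
    (hk : k < 4) (hl : l < 4) (h1 : i ≠ j) (h2 : i ≠ k) (h3 : i ≠ l) (h4 : j ≠ k)
    (h5 : j ≠ l) (h6 : k ≠ l) (h : w i j + w j k + w k l + w l i < 0) :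
    enumB w = true := by
  unfold enumB
  simp only [Bool.or_eq_true]
  exact Or.inr <| Or.inr <| Or.inr <| List.any_eq_true.mpr ⟨i, List.mem_range.mpr hi,
    List.any_eq_true.mpr ⟨j, List.mem_range.mpr hj,
      List.any_eq_true.mpr ⟨k, List.mem_range.mpr hk,
        List.any_eq_true.mpr ⟨l, List.mem_range.mpr hl, by simp [h1, h2, h3, h4, h5, h6, h]⟩⟩⟩⟩

-- every negative closed walk yields a negative simple cycle the enumeration checks
theorem cyc_to_enum : ∀ (n : Nat) (w : Nat → Nat → Int) (i : Nat) (mids : List Nat),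
    mids.length ≤ n → i < 4 → (∀ x ∈ mids, x < 4) →
    pw w ((i :: mids) ++ [i]) < 0 → enumB w = true := by
  intro n
  induction n with
  | zero =>
      intro w i mids hlen hi _ hneg
      have hmids : mids = [] := List.length_eq_zero_iff.mp (by omega)
      subst hmids
      simp [pw] at hneg
      exact enum1 w i hi hneg
  | succ n ih =>
      intro w i mids hlen hi hb hneg
      by_cases hnd : (i :: mids).Nodup
      · have hball : ∀ x ∈ i :: mids, x < 4 := by
          intro x hx
          rcases List.mem_cons.mp hx with rfl | hx
          · exact hi
          · exact hb x hx
        have hlen4 := nodup_lt4_len _ hnd hball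
        simp only [List.length_cons] at hlen4
        rcases mids with _ | ⟨b, _ | ⟨c, _ | ⟨d, _ | ⟨e, rest⟩⟩⟩⟩
        · simp [pw] at hneg
          exact enum1 w i hi hneg
        · have hib : i ≠ b := by intro h; subst h; simp at hnd
          simp [pw] at hneg
          exact enum2 w i b hi (hb b (by simp)) hib (by omega)
        · have hib : i ≠ b := by intro h; subst h; simp at hnd
          have hic : i ≠ c := by intro h; subst h; simp at hnd
          have hbc : b ≠ c := by intro h; subst h; simp at hnd
          simp [pw] at hneg
          exact enum3 w i b c hi (hb b (by simp)) (hb c (by simp)) hib hbc hic (by omega)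
        · have hib : i ≠ b := by intro h; subst h; simp at hnd
          have hic : i ≠ c := by intro h; subst h; simp at hnd
          have hid : i ≠ d := by intro h; subst h; simp at hnd
          have hbc : b ≠ c := by intro h; subst h; simp at hnd
          have hbd : b ≠ d := by intro h; subst h; simp at hnd
          have hcd : c ≠ d := by intro h; subst h; simp at hnd
          simp [pw] at hneg
          exact enum4 w i b c d hi (hb b (by simp)) (hb c (by simp)) (hb d (by simp))
            hib hic hid hbc hbd hcd (by omega)
        · simp at hlen4; omega
      · obtain ⟨xs, v, ys, zs, hdec⟩ := not_nodup_decomp _ hnd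
        have hball : ∀ x ∈ xs ++ (v :: ys) ++ v :: zs, x < 4 := by
          rw [← hdec]
          intro x hx
          rcases List.mem_cons.mp hx with rfl | hx
          · exact hi
          · exact hb x hx
        have hv : v < 4 := hball v (by simp)
        have hys : ∀ x ∈ ys, x < 4 := fun x hx => hball x (by simp [hx])
        have hzs : ∀ x ∈ zs, x < 4 := fun x hx => hball x (by simp [hx])
        cases xs with
        | nil =>
            simp only [List.nil_append, List.cons_append] at hdec
            injection hdec with h1 h2
            subst h1; subst h2
            simp only [List.cons_append, List.append_assoc] at hneg
            rw [pw_split w ys i i (zs ++ [i])] at hneg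
            by_cases hneg1 : pw w (i :: (ys ++ [i])) < 0
            · refine ih w i ys (by simp only [List.length_append, List.length_cons] at hlen; omega) hi hys ?_
              simp only [List.cons_append]
              omega
            · refine ih w i zs (by simp only [List.length_append, List.length_cons] at hlen; omega) hi hzs ?_
              simp only [List.cons_append]
              omega
        | cons a xs' =>
            simp only [List.cons_append, List.append_assoc] at hdec
            injection hdec with h1 h2
            subst h1; subst h2
            have hxs' : ∀ x ∈ xs', x < 4 := fun x hx => hball x (by simp [hx])
            simp only [List.cons_append, List.append_assoc] at hneg
            rw [pw_split w xs' i v (ys ++ v :: (zs ++ [i])), pw_split w ys v v (zs ++ [i])] at hneg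
            by_cases hneg1 : pw w (v :: (ys ++ [v])) < 0
            · refine ih w v ys (by simp only [List.length_append, List.length_cons] at hlen; omega) hv hys ?_
              simp only [List.cons_append]
              omega
            · refine ih w i (xs' ++ v :: zs)
                (by simp only [List.length_append, List.length_cons] at hlen ⊢; omega) hi ?_ ?_
              · intro x hx
                rcases List.mem_append.mp hx with hx | hx
                · exact hxs' x hx
                · rcases List.mem_cons.mp hx with rfl | hx
                  · exact hv
                  · exact hzs x hx
              · simp only [List.cons_append, List.append_assoc]
                rw [pw_split w xs' i v (zs ++ [i])]
                omega

theorem fw_to_enum (w : Nat → Nat → Int) (h : fwAny w = true) : enumB w = true := by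
  obtain ⟨i, hi, hlt⟩ := List.any_eq_true.mp h
  have hi4 : i < 4 := List.mem_range.mp hi
  have hlt' : fwFinal w i i < 0 := of_decide_eq_true hlt
  obtain ⟨mids, hb, heq⟩ := sinv_dAfter w 4 le_rfl i i hi4 hi4
  rw [← fwFinal_eq] at heq
  exact cyc_to_enum mids.length w i mids le_rfl hi4 hb (by omega)

theorem enum_to_fw (w : Nat → Nat → Int) (h : enumB w = true) : fwAny w = true := by
  have key : ∀ (i : Nat) (mids : List Nat), i < 4 → (∀ x ∈ mids, x < 4) → mids.Nodup →
      pw w ((i :: mids) ++ [i]) < 0 → fwAny w = true := by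
    intro i mids hi hb hnd hneg
    have hcmp := fw_complete 4 le_rfl w i i mids hi hi hb hnd
    rw [← fwFinal_eq] at hcmp
    exact List.any_eq_true.mpr ⟨i, List.mem_range.mpr hi, decide_eq_true (by omega)⟩
  simp only [enumB, Bool.or_eq_true, List.any_eq_true, Bool.and_eq_true,
    decide_eq_true_eq, List.mem_range] at h
  rcases h with ⟨i, hi, h⟩ | ⟨i, hi, j, hj, hne, h⟩ |
    ⟨i, hi, j, hj, k, hk, ⟨⟨hne1, hne2⟩, hne3⟩, h⟩ |
    ⟨i, hi, j, hj, k, hk, l, hl, ⟨⟨⟨⟨⟨hne1, hne2⟩, hne3⟩, hne4⟩, hne5⟩, hne6⟩, h⟩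
  · exact key i [] hi (by simp) (by simp) (by simp [pw]; omega)
  · exact key i [j] hi (by simp; omega) (by simp) (by simp [pw]; omega)
  · exact key i [j, k] hi (by simp; omega) (by simp [hne2]) (by simp [pw]; omega)
  · exact key i [j, k, l] hi (by simp; omega) (by simp [hne4, hne5, hne6])
      (by simp [pw]; omega)

theorem fw_eq_enum (w : Nat → Nat → Int) : fwAny w = enumB w := by
  cases hf : fwAny w <;> cases he : enumB w
  · rfl
  · exact absurd (enum_to_fw w he) (by simp [hf])
  · exact absurd (fw_to_enum w hf) (by simp [he])
  · rfl

theorem wget_wmat (g : List (List Int)) (i j : Nat) (hi : i < 4) (hj : j < 4) :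
    wgetB (wmatB g) i j = wtA g i j := by
  have hrow : (wmatB g).getD i [] = (List.range 4).map (fun j => wtB g i j) := by
    unfold wmatB
    rw [List.getD_eq_getElem?_getD, List.getElem?_map, List.getElem?_range hi]
    rfl
  unfold wgetB
  rw [hrow, List.getD_eq_getElem?_getD, List.getElem?_map, List.getElem?_range hj]
  rfl

theorem any_range4_congr (p q : Nat → Bool) (h : ∀ i, i < 4 → p i = q i) :
    (List.range 4).any p = (List.range 4).any q := by
  rw [range4_eq]
  simp only [List.any_cons, List.any_nil]
  rw [h 0 (by omega), h 1 (by omega), h 2 (by omega), h 3 (by omega)]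

theorem enumB_congr (w w' : Nat → Nat → Int)
    (h : ∀ i j, i < 4 → j < 4 → w i j = w' i j) : enumB w = enumB w' := by
  unfold enumB
  refine congrArg₂ (· || ·) ?_ (congrArg₂ (· || ·) ?_ (congrArg₂ (· || ·) ?_ ?_))
  · refine any_range4_congr _ _ fun a ha => ?_
    rw [h a a ha ha]
  · refine any_range4_congr _ _ fun a ha => any_range4_congr _ _ fun b hb => ?_
    rw [h a b ha hb, h b a hb ha]
  · refine any_range4_congr _ _ fun a ha => any_range4_congr _ _ fun b hb =>
      any_range4_congr _ _ fun c hc => ?_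
    rw [h a b ha hb, h b c hb hc, h c a hc ha]
  · refine any_range4_congr _ _ fun a ha => any_range4_congr _ _ fun b hb =>
      any_range4_congr _ _ fun c hc => any_range4_congr _ _ fun d hd => ?_
    rw [h a b ha hb, h b c hb hc, h c d hc hd, h d a hd ha]

-- ===== VERDICT (by name: the statement is the Claim_ definition above) =====
theorem negCyclefloydWarshall_spec : Claim_equal_negCyclefloydWarshall := by
  intro graph _ _
  show negCyclefloydWarshall graph = negCyclefloydWarshall_alt graph
  rw [port_eq_model graph, fw_eq_enum (wtA graph)]
  exact enumB_congr _ _ fun i j hi hj => (wget_wmat graph i j hi hj).symm
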